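-- pv_equiv track=rewrite | github.com/ANR-kFLOW/Fact_checking_reasoner | inf.py | extract_SOR
-- ===== SOURCE A (Python) =====
-- def extract_SOR(sentence, prediction):
--     sentence = sentence.lower()
--     prediction = prediction.lower()
--     words = prediction.split()
--     relation = words[-1]
--     remaining_words = words[:-1]
--     sentence_words = sentence.split()
--
--     if len(words) == 3:
--         subject = words[0]
--         obj = words[1]
--     else:
--         subject = []
--         obj = []
--         sentence_index = 0
--         if remaining_words[0] in sentence_words:
--             try:
--                 sentence_index = sentence_words.index(remaining_words[0])
--             except ValueError:
--                 return 'invalid', relation, 'invalid'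
--
--             subject_ended = False
--             for word in remaining_words:
--                 if not subject_ended:
--                     if sentence_index < len(sentence_words) and word == sentence_words[sentence_index]:
--                         subject.append(word)
--                         sentence_index += 1
--                     else:
--                         subject_ended = True
--                         obj.append(word)
--                 else:
--                     obj.append(word)
--
--             subject = ' '.join(subject)
--             obj = ' '.join(obj)
--         else:
--             subject = 'invalid'
--             obj = 'invalid'
--
--     return subject, relation, obj
-- ===== SOURCE B (Python) =====
-- def extract_SOR(sentence, prediction):
--     sentence = sentence.lower()
--     prediction = prediction.lower()
--     words = prediction.split()
--     relation = words[-1]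
--     remaining_words = words[:-1]
--     sentence_words = sentence.split()
--
--     if len(words) == 3:
--         return words[0], relation, words[1]
--
--     if remaining_words[0] not in sentence_words:
--         return 'invalid', relation, 'invalid'
--
--     start = sentence_words.index(remaining_words[0])
--     # Binary search for the largest split point k with
--     # remaining_words[:k] == sentence_words[start:start+k].
--     # The predicate is monotone in k (any prefix of a match is a match),
--     # and k = 1 holds by the choice of start, so the search is valid.
--     lo, hi = 1, len(remaining_words)
--     while lo < hi:
--         mid = (lo + hi + 1) // 2
--         if remaining_words[:mid] == sentence_words[start:start + mid]:
--             lo = mid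
--         else:
--             hi = mid - 1
--     return ' '.join(remaining_words[:lo]), relation, ' '.join(remaining_words[lo:])
-- ===== Notes on version B (the rewrite author's own statement) =====
-- stated objective: alternative
-- what changed: Replaces A's forward word-by-word accumulator loop (subject_ended flag, running sentence index) with a binary search over candidate split points: the predicate 'remaining_words[:k] equals sentence_words[start:start+k]' is monotone in k, so the largest valid k is found by bisection on slice equality and the subject/object are two slices at that point.
import Mathlib
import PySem

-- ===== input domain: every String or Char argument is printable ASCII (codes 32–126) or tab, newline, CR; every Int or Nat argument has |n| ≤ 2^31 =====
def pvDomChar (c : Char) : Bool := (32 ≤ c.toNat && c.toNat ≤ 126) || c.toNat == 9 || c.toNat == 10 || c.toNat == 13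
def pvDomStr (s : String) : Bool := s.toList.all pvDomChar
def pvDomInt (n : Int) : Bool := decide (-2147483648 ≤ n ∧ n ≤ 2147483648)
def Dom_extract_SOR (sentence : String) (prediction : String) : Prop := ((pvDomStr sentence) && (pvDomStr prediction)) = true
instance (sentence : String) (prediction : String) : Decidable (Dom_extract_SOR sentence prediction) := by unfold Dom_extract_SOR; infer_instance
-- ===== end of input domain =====

-- B replaces A's forward accumulator loop (subject_ended flag, running index) by a binary search
-- over candidate split points, exploiting that slice-prefix equality is monotone (objective: alternative).


-- ===== PORT A =====
-- one iteration of A's 'for word in remaining_words' loop; state = (subject, obj, sentence_index, subject_ended)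
def aStep (sw : List String) (st : List String × List String × Nat × Bool) (w : String) :
    List String × List String × Nat × Bool :=
  match st with
  | (subj, obj, idx, ended) =>
    if !ended then
      if idx < sw.length && (w == sw.getD idx "") then
        (subj ++ [w], obj, idx + 1, ended)
      else
        (subj, obj ++ [w], idx, true)
    else
      (subj, obj ++ [w], idx, ended)

def extract_SOR (sentence : String) (prediction : String) : String × String × String :=
  let sentence := PySem.Str.lower sentence
  let prediction := PySem.Str.lower prediction
  let words := PySem.Str.split₀ prediction
  match PySem.List.pyGet? words (-1) with
  | none => ("", "", "")  -- Python raises IndexError here (prediction has no words); excluded by Pre_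
  | some relation =>
    let remaining_words := PySem.List.slice words none (some (-1))
    let sentence_words := PySem.Str.split₀ sentence
    if words.length = 3 then
      (words.getD 0 "", relation, words.getD 1 "")
    else
      match PySem.List.pyGet? remaining_words 0 with
      | none => ("", "", "")  -- Python raises IndexError here (single-word prediction); excluded by Pre_
      | some w0 =>
        if w0 ∈ sentence_words then
          match PySem.List.index? sentence_words w0 with
          | none => ("invalid", relation, "invalid")  -- A's dead except ValueError branch
          | some i0 =>
            let st := remaining_words.foldl (aStep sentence_words) ([], [], i0, false)
            (PySem.Str.join " " st.1, relation, PySem.Str.join " " st.2.1)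
        else
          ("invalid", relation, "invalid")

-- ===== PORT B =====
-- Source B's 'while lo < hi' bisection; swd is sentence_words already dropped at start, so
-- swd.take mid is Python's sentence_words[start:start+mid] (exact: start, mid ≥ 0)
def bSplit (rw swd : List String) (lo hi : Nat) : Nat :=
  if h : lo < hi then
    if rw.take ((lo + hi + 1) / 2) == swd.take ((lo + hi + 1) / 2) then
      bSplit rw swd ((lo + hi + 1) / 2) hi
    else
      bSplit rw swd lo ((lo + hi + 1) / 2 - 1)
  else lo
termination_by hi - lo
decreasing_by
  · omega
  · omega

def extract_SOR_alt (sentence : String) (prediction : String) : String × String × String :=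
  let sentence := PySem.Str.lower sentence
  let prediction := PySem.Str.lower prediction
  let words := PySem.Str.split₀ prediction
  match PySem.List.pyGet? words (-1) with
  | none => ("", "", "")  -- Python raises IndexError here; excluded by Pre_
  | some relation =>
    let remaining_words := PySem.List.slice words none (some (-1))
    let sentence_words := PySem.Str.split₀ sentence
    if words.length = 3 then
      (words.getD 0 "", relation, words.getD 1 "")
    else
      match PySem.List.pyGet? remaining_words 0 with
      | none => ("", "", "")  -- Python raises IndexError here; excluded by Pre_
      | some w0 =>
        if w0 ∈ sentence_words then
          match PySem.List.index? sentence_words w0 with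
          | none => ("invalid", relation, "invalid")  -- unreachable: w0 ∈ sentence_words
          | some start =>
            let k := bSplit remaining_words (sentence_words.drop start) 1 remaining_words.length
            (PySem.Str.join " " (remaining_words.take k), relation,
             PySem.Str.join " " (remaining_words.drop k))
        else
          ("invalid", relation, "invalid")

-- ===== PRECONDITION & SPEC =====
-- Pre_ excludes exactly the inputs where A raises IndexError: a prediction with fewer than two words.
def Pre_extract_SOR (sentence : String) (prediction : String) : Prop :=
  2 ≤ (PySem.Str.split₀ (PySem.Str.lower prediction)).length
instance (sentence : String) (prediction : String) : Decidable (Pre_extract_SOR sentence prediction) := by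
  unfold Pre_extract_SOR; infer_instance
def pvWitness_extract_SOR : String × String := ("the cat runs fast", "the cat runs")

def Spec_extract_SOR (sentence : String) (prediction : String) (out : String × String × String) : Prop := out = extract_SOR_alt sentence prediction
instance (sentence : String) (prediction : String) (out : String × String × String) : Decidable (Spec_extract_SOR sentence prediction out) := by unfold Spec_extract_SOR; infer_instance

-- ===== CLAIM (what is proved, stated in full; the proofs are below) =====
def Claim_equal_extract_SOR : Prop := ∀ (sentence : String) (prediction : String), Dom_extract_SOR sentence prediction → Pre_extract_SOR sentence prediction → Spec_extract_SOR sentence prediction (extract_SOR sentence prediction)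

-- ===== LEMMAS AND PROOFS =====

-- proof-only notion: the length of the common prefix of two word lists
def prefixLen : List String → List String → Nat
  | x :: xs, y :: ys => if x == y then prefixLen xs ys + 1 else 0
  | _, _ => 0

theorem prefixLen_le (rw swd : List String) : prefixLen rw swd ≤ rw.length := by
  induction rw generalizing swd with
  | nil => simp [prefixLen]
  | cons x xs ih =>
    cases swd with
    | nil => simp [prefixLen]
    | cons y ys =>
      simp only [prefixLen]
      split
      · exact Nat.succ_le_succ (ih ys)
      · simp

-- the bisection predicate is characterised by prefixLen (for k within rw)
theorem take_eq_iff (k : Nat) (rw swd : List String) (hk : k ≤ rw.length) :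
    rw.take k = swd.take k ↔ k ≤ prefixLen rw swd := by
  induction k generalizing rw swd with
  | zero => simp
  | succ k ih =>
    cases rw with
    | nil => simp at hk
    | cons x xs =>
      cases swd with
      | nil =>
        simp only [List.take_succ_cons, List.take_nil, prefixLen]
        constructor
        · intro h; simp at h
        · intro h; omega
      | cons y ys =>
        simp only [List.take_succ_cons, List.cons.injEq, prefixLen]
        by_cases hxy : x = y
        · simp only [hxy, beq_self_eq_true, if_true, true_and]
          rw [ih xs ys (by simpa using hk)]
          omega
        · have : (x == y) = false := by simp [hxy]
          simp [this, hxy]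

-- once subject_ended is true, A's loop only appends to obj
theorem foldl_aStep_ended (sw : List String) (ws subj obj : List String) (idx : Nat) :
    ws.foldl (aStep sw) (subj, obj, idx, true) = (subj, obj ++ ws, idx, true) := by
  induction ws generalizing obj with
  | nil => simp
  | cons w ws ih => simp [aStep, ih]

-- A's loop from a live state computes exactly the common-prefix split
theorem foldl_aStep_eq (sw : List String) (ws subj : List String) (idx : Nat) :
    (ws.foldl (aStep sw) (subj, [], idx, false)).1 = subj ++ ws.take (prefixLen ws (sw.drop idx)) ∧
    (ws.foldl (aStep sw) (subj, [], idx, false)).2.1 = ws.drop (prefixLen ws (sw.drop idx)) := by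
  induction ws generalizing subj idx with
  | nil => simp
  | cons w ws ih =>
    simp only [List.foldl_cons, aStep, Bool.not_false, if_true]
    by_cases hlt : idx < sw.length
    · have hget : sw[idx]? = some sw[idx] := List.getElem?_eq_getElem hlt
      have hdrop : sw.drop idx = sw[idx] :: sw.drop (idx + 1) := List.drop_eq_getElem_cons hlt
      rw [hdrop]
      by_cases hw : w = sw[idx]
      · rw [if_pos (by simp [List.getD, hlt, hw])]
        obtain ⟨h1, h2⟩ := ih (subj ++ [w]) (idx + 1)
        refine ⟨?_, ?_⟩
        · rw [h1]; simp [prefixLen, hw]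
        · rw [h2]; simp [prefixLen, hw]
      · rw [if_neg (by simp [List.getD, hget]; intro _ h; exact hw h), foldl_aStep_ended]
        simp [prefixLen, hw]
    · rw [if_neg (by simp [hlt]), foldl_aStep_ended,
          List.drop_eq_nil_of_le (le_of_not_gt hlt)]
      simp [prefixLen]

-- the bisection, started inside [lo, hi] with lo ≤ p ≤ hi ≤ |rw|, returns p = prefixLen rw swd
theorem bSplit_spec (rw swd : List String) :
    ∀ d lo hi, hi - lo ≤ d → lo ≤ prefixLen rw swd → prefixLen rw swd ≤ hi →
      hi ≤ rw.length → bSplit rw swd lo hi = prefixLen rw swd := by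
  intro d
  induction d with
  | zero =>
    intro lo hi h1 h2 h3 h4
    rw [bSplit]
    have hnl : ¬ lo < hi := by omega
    simp only [hnl, dif_neg, not_false_iff]
    omega
  | succ d ih =>
    intro lo hi h1 h2 h3 h4
    rw [bSplit]
    by_cases hlh : lo < hi
    · simp only [hlh, dif_pos]
      have hm1 : lo < (lo + hi + 1) / 2 := by omega
      have hm2 : (lo + hi + 1) / 2 ≤ hi := by omega
      by_cases hP : rw.take ((lo + hi + 1) / 2) = swd.take ((lo + hi + 1) / 2)
      · have hle : (lo + hi + 1) / 2 ≤ prefixLen rw swd :=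
          (take_eq_iff _ rw swd (by omega)).1 hP
        rw [if_pos (by simpa using hP)]
        exact ih _ hi (by omega) hle h3 h4
      · have hgt : ¬ (lo + hi + 1) / 2 ≤ prefixLen rw swd := fun h =>
          hP ((take_eq_iff _ rw swd (by omega)).2 h)
        rw [if_neg (by simpa using hP)]
        exact ih lo _ (by omega) h2 (by omega) (by omega)
    · simp only [hlh, dif_neg, not_false_iff]
      omega

-- ===== VERDICT (by name: the statement is the Claim_ definition above) =====
theorem extract_SOR_spec : Claim_equal_extract_SOR := by
  intro sentence prediction _ _
  simp only [Spec_extract_SOR, extract_SOR, extract_SOR_alt]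
  generalize PySem.Str.split₀ (PySem.Str.lower prediction) = words
  generalize PySem.Str.split₀ (PySem.Str.lower sentence) = sw
  cases hrel : PySem.List.pyGet? words (-1) with
  | none => rfl
  | some relation =>
    simp only
    split
    · rfl
    · cases hw0 : PySem.List.pyGet? (PySem.List.slice words none (some (-1))) 0 with
      | none => rfl
      | some w0 =>
        simp only
        split
        · cases hix : PySem.List.index? sw w0 with
          | none => rfl
          | some i0 =>
            simp only
            set rw := PySem.List.slice words none (some (-1)) with hrw
            have h := foldl_aStep_eq sw rw [] i0
            rw [h.1, h.2]
            -- rw is nonempty with head w0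
            obtain ⟨x, xs, hx⟩ : ∃ x xs, rw = x :: xs := by
              cases hc : rw with
              | nil =>
                rw [hc] at hw0
                simp [PySem.List.pyGet?, PySem.List.pyIdx?] at hw0
              | cons a b => exact ⟨a, b, rfl⟩
            have hxw0 : x = w0 := by
              rw [hx] at hw0
              simpa [PySem.List.pyGet?, PySem.List.pyIdx?] using hw0
            -- sw.drop i0 has head w0
            obtain ⟨hlt, hswi, -⟩ := PySem.List.getElem_of_index?_eq_some hix
            have hdrop : sw.drop i0 = w0 :: sw.drop (i0 + 1) := by
              rw [List.drop_eq_getElem_cons hlt, hswi]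
            -- prefixLen ≥ 1
            have hp1 : 1 ≤ prefixLen rw (sw.drop i0) := by
              rw [hx, hxw0, hdrop]; simp [prefixLen]
            have hk : bSplit rw (sw.drop i0) 1 rw.length = prefixLen rw (sw.drop i0) :=
              bSplit_spec rw (sw.drop i0) rw.length 1 rw.length
                (by omega) hp1 (prefixLen_le _ _) (le_refl _)
            rw [hk]
            simp
        · rfl
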